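-- pv_equiv track=rewrite | github.com/Sasha95/Tupper | app/scripts/generate.py | from_k_to_bin
-- ===== SOURCE A (Python) =====
-- def from_k_to_bin(k: int) -> list:
--     k //= 17
--     binary = bin(k)[2:]
--     binary = binary.rjust(1802, "0")
--
--     lists = [[] for x in range(17)]
--     for x in range(1802):
--         lists[x % 17].append(binary[x])
--
--     lists.reverse()
--     return lists
-- ===== SOURCE B (Python) =====
-- def from_k_to_bin(k: int) -> list:
--     # Same preprocessing; the grid is then built by cutting the string into
--     # 106 consecutive 17-char chunks and transposing them (zip), instead of
--     # distributing a single indexed pass into 17 buckets by x % 17.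
--     k //= 17
--     s = bin(k)[2:].rjust(1802, "0")
--     chunks = []
--     while s:
--         chunks.append(s[:17])
--         s = s[17:]
--     return [list(col) for col in reversed(list(zip(*chunks)))]
-- ===== Notes on version B (the rewrite author's own statement) =====
-- stated objective: alternative
-- what changed: A distributes one indexed pass over all 1802 positions into 17 buckets keyed by x % 17 and reverses; B instead cuts the padded binary string into 106 consecutive 17-character chunks with a consuming while loop and transposes them with zip(*chunks), reading the grid column-wise rather than scattering row-wise.
import Mathlib
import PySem

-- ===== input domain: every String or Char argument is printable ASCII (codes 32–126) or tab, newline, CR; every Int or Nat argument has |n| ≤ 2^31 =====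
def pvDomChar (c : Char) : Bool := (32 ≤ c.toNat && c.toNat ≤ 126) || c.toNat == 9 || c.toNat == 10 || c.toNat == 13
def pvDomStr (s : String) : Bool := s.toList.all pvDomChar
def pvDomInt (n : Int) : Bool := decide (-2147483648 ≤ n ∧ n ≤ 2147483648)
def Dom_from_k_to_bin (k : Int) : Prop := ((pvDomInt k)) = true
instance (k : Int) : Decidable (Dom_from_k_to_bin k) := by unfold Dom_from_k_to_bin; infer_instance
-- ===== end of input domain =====

-- ===== PORT A =====
-- B builds the grid by cutting the padded string into 17-char chunks and transposing them;
-- A distributes one indexed pass into 17 buckets by x % 17. Same return value (objective: alternative).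
-- shared preprocessing lines (identical in Source A and Source B): k //= 17; binary = bin(k)[2:]; binary = binary.rjust(1802, "0")
def pvBinary (k : Int) : List Char :=
  let k' := PySem.Int.floordiv k 17
  let b := PySem.List.slice (PySem.Int.toBinChars0b k') (some 2) none
  List.replicate (1802 - b.length) '0' ++ b    -- .rjust(1802, "0"): left-pad with '0' (exact: no cap, pad = width - len)

def from_k_to_bin (k : Int) : List (List String) :=
  let binary := pvBinary k
  let lists : List (List String) := (List.range 17).map (fun _ => ([] : List String))
  let lists := (List.range 1802).foldl
    -- binary[x]: always in range (len ≥ 1802 after rjust), so getD's default is never used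
    (fun L x => L.set (x % 17) ((L.getD (x % 17) []) ++ [String.ofList [binary.getD x ' ']])) lists
  lists.reverse

-- ===== PORT B =====
-- the while loop of Source B: cut the string into consecutive 17-char pieces (s[:17] = take 17, s[17:] = drop 17; exact for these nonnegative slice bounds)
def pvChunks (s : List Char) : List (List Char) :=
  if h : s = [] then [] else s.take 17 :: pvChunks (s.drop 17)
termination_by s.length
decreasing_by
  have hp : 0 < s.length := List.length_pos_of_ne_nil h
  simp [List.length_drop]; omega

-- zip(*chunks): one column per step while every chunk still has a character; the fuel
-- (length of the first chunk) bounds the column count exactly as zip's shortest-input rule does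
def pvZipStarAux : Nat → List (List Char) → List (List Char)
  | 0, _ => []
  | n + 1, L =>
    if L ≠ [] ∧ L.all (fun r => !r.isEmpty) then
      (L.map (fun r => r.headD ' ')) :: pvZipStarAux n (L.map List.tail)
    else []

def from_k_to_bin_alt (k : Int) : List (List String) :=
  let binary := pvBinary k
  let chunks := pvChunks binary
  ((pvZipStarAux ((chunks.headD []).length) chunks).reverse).map
    (fun col => col.map (fun c => String.ofList [c]))

-- ===== PRECONDITION & SPEC =====
def Spec_from_k_to_bin (k : Int) (out : List (List String)) : Prop := out = from_k_to_bin_alt k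
instance (k : Int) (out : List (List String)) : Decidable (Spec_from_k_to_bin k out) := by unfold Spec_from_k_to_bin; infer_instance

-- ===== CLAIM (what is proved, stated in full; the proofs are below) =====
def Claim_equal_from_k_to_bin : Prop := ∀ (k : Int), Dom_from_k_to_bin k → Spec_from_k_to_bin k (from_k_to_bin k)

-- ===== LEMMAS AND PROOFS =====

-- A's bucket-distribution loop, characterised: bucket j ends up with f x for every x < N with x % 17 = j, in order.
theorem pv_foldA (f : Nat → String) (N : Nat) :
    (List.range N).foldl
      (fun (L : List (List String)) x => L.set (x % 17) ((L.getD (x % 17) []) ++ [f x]))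
      ((List.range 17).map (fun _ => ([] : List String)))
    = (List.range 17).map (fun j => ((List.range N).filter (fun x => x % 17 == j)).map f) := by
  induction N with
  | zero => simp
  | succ N ih =>
    rw [List.range_succ (n := N), List.foldl_append, ih]
    apply List.ext_getElem
    · simp
    · intro i h1 h2
      have hi : i < 17 := by simpa using h2
      have hmod : N % 17 < 17 := by omega
      simp only [List.foldl_cons, List.foldl_nil]
      rw [List.getElem_map, List.getElem_range, List.filter_append, List.getElem_set]
      have hgetD : (List.map (fun j => ((List.range N).filter (fun x => x % 17 == j)).map f)
            (List.range 17)).getD (N % 17) []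
          = ((List.range N).filter (fun x => x % 17 == N % 17)).map f := by
        rw [List.getD_eq_getElem?_getD, List.getElem?_map, List.getElem?_range hmod]; rfl
      by_cases hc : N % 17 = i
      · subst hc
        rw [if_pos rfl, hgetD]
        have hone : (List.filter (fun x => x % 17 == N % 17) [N]) = [N] := by simp
        rw [hone, List.map_append]
        rfl
      · rw [if_neg hc, List.getElem_map, List.getElem_range]
        have hnone : (List.filter (fun x => x % 17 == i) [N]) = [] := by simp [hc]
        rw [hnone, List.map_append]
        simp

-- the indices x < 17*n with x % 17 = j, listed in order, are j, j+17, …, j+17*(n-1)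
theorem pv_filt (j n : Nat) (hj : j < 17) :
    (List.range (17 * n)).filter (fun x => x % 17 == j)
    = (List.range n).map (fun i => j + 17 * i) := by
  induction n with
  | zero => simp
  | succ n ih =>
    have hsplit : 17 * (n + 1) = 17 * n + 17 := by ring
    have hrows : ∀ j' < 17, (List.range 17).filter (fun r => r == j') = [j'] := by decide
    rw [hsplit, List.range_add, List.filter_append, ih, List.range_succ (n := n), List.map_append]
    congr 1
    rw [List.filter_map]
    have hcong : (List.range 17).filter ((fun x => x % 17 == j) ∘ (fun r => 17 * n + r))
        = (List.range 17).filter (fun r => r == j) := by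
      apply List.filter_congr
      intro r hr
      have : r < 17 := List.mem_range.mp hr
      have : (17 * n + r) % 17 = r := by omega
      simp [this]
    rw [hcong, hrows j hj]
    simp [Nat.add_comm]

-- B's while loop, characterised: a string of length 17*n is cut into n consecutive 17-char pieces
theorem pv_chunks (n : Nat) (s : List Char) (hs : s.length = 17 * n) :
    pvChunks s = (List.range n).map (fun i => (s.drop (17 * i)).take 17) := by
  induction n generalizing s with
  | zero =>
    have : s = [] := List.eq_nil_of_length_eq_zero (by omega)
    subst this
    rw [pvChunks.eq_def]
    simp
  | succ n ih =>
    have hne : s ≠ [] := by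
      intro h; subst h; simp at hs
    rw [pvChunks.eq_def, dif_neg hne]
    have hdrop : (s.drop 17).length = 17 * n := by
      simp [List.length_drop, hs]; omega
    rw [ih (s.drop 17) hdrop, List.range_succ_eq_map, List.map_cons, List.map_map]
    apply List.cons_eq_cons.mpr
    constructor
    · simp
    · apply List.map_congr_left
      intro a _
      simp only [Function.comp, List.drop_drop]
      congr 2
      omega

-- zip(*L) on a rectangular layout: column j collects the j-th character of every row
theorem pv_zip (n : Nat) (L : List (List Char)) (hne : L ≠ [])
    (hlen : ∀ r ∈ L, r.length = n) :
    pvZipStarAux n L = (List.range n).map (fun j => L.map (fun r => r.getD j ' ')) := by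
  induction n generalizing L with
  | zero => rw [pvZipStarAux]; simp
  | succ n ih =>
    have hall : L.all (fun r => !r.isEmpty) = true := by
      rw [List.all_eq_true]
      intro r hr
      have := hlen r hr
      cases r with
      | nil => simp at this
      | cons a t => simp
    rw [pvZipStarAux, if_pos ⟨hne, hall⟩]
    have hne' : L.map List.tail ≠ [] := by simpa using hne
    have hlen' : ∀ r ∈ L.map List.tail, r.length = n := by
      intro r hr
      obtain ⟨r', hr', rfl⟩ := List.mem_map.mp hr
      have := hlen r' hr'
      simp [List.length_tail, this]
    rw [ih (L.map List.tail) hne' hlen', List.range_succ_eq_map, List.map_cons, List.map_map]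
    congr 1
    · apply List.map_congr_left
      intro r _
      cases r <;> rfl
    · apply List.map_congr_left
      intro j _
      simp only [Function.comp, List.map_map]
      apply List.map_congr_left
      intro r _
      cases r <;> simp [List.getD]

-- under Dom, bin(k // 17)[2:] has at most 33 characters, so rjust pads to exactly 1802
theorem pv_len (k : Int) (hk : Dom_from_k_to_bin k) :
    (PySem.List.slice (PySem.Int.toBinChars0b (PySem.Int.floordiv k 17)) (some 2) none).length ≤ 33 := by
  have hdom : -2147483648 ≤ k ∧ k ≤ 2147483648 := by
    simpa [Dom_from_k_to_bin, pvDomInt] using hk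
  set k' := PySem.Int.floordiv k 17 with hk'
  have hub : k' < 2147483648 := by
    rw [hk', PySem.Int.floordiv_lt_iff_lt_mul (by norm_num)]
    omega
  have hlb : -2147483648 ≤ k' := by
    rw [hk', PySem.Int.le_floordiv_iff_mul_le (by norm_num)]
    omega
  have habs : k'.natAbs < 2 ^ 32 := by
    have : k'.natAbs ≤ 2147483648 := by omega
    calc k'.natAbs ≤ 2147483648 := this
      _ < 2 ^ 32 := by norm_num
  have hdig : ∀ m : Nat, m < 2 ^ 32 → (Nat.toDigits 2 m).length ≤ 32 := fun m hm =>
    Nat.toDigits_length 2 m 32 (by norm_num) hm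
  have hslice : PySem.List.slice (PySem.Int.toBinChars0b k') (some 2) none
      = (PySem.Int.toBinChars0b k').drop 2 := by simp [pysem]
  rw [hslice]
  unfold PySem.Int.toBinChars0b
  split_ifs with hneg
  · -- bin is '-0b…': [2:] keeps the stray 'b' plus the digits (A's negative-k quirk, reproduced by both)
    have he : List.drop 2 ('-' :: '0' :: 'b' :: Nat.toDigits 2 k'.natAbs)
        = 'b' :: Nat.toDigits 2 k'.natAbs := rfl
    rw [he]
    have := hdig k'.natAbs habs
    simp only [List.length_cons]
    omega
  · have he : List.drop 2 ('0' :: 'b' :: Nat.toDigits 2 k'.toNat)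
        = Nat.toDigits 2 k'.toNat := rfl
    rw [he]
    have h1 : k'.toNat = k'.natAbs := by omega
    have := hdig k'.toNat (by rw [h1]; exact habs)
    omega

-- ===== VERDICT (by name: the statement is the Claim_ definition above) =====
theorem from_k_to_bin_spec : Claim_equal_from_k_to_bin := by
  intro k hk
  show from_k_to_bin k = from_k_to_bin_alt k
  have hlen : (pvBinary k).length = 1802 := by
    unfold pvBinary
    have := pv_len k hk
    simp only [List.length_append, List.length_replicate]
    omega
  simp only [from_k_to_bin, from_k_to_bin_alt]
  set s := pvBinary k with hs
  -- A side
  rw [pv_foldA (fun x => String.ofList [s.getD x ' ']) 1802]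
  -- B side: chunks, then columns
  have hch : pvChunks s = (List.range 106).map (fun i => (s.drop (17 * i)).take 17) := by
    exact pv_chunks 106 s (by rw [hlen])
  have hrowlen : ∀ r ∈ pvChunks s, r.length = 17 := by
    rw [hch]
    intro r hr
    obtain ⟨i, hi, rfl⟩ := List.mem_map.mp hr
    have hi' : i < 106 := List.mem_range.mp hi
    simp [List.length_take, List.length_drop, hlen]
    omega
  have hhead : ((pvChunks s).headD []).length = 17 := by
    have hne : pvChunks s ≠ [] := by
      rw [hch]; simp
    cases h : pvChunks s with
    | nil => exact absurd h hne
    | cons a t =>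
      have : a ∈ pvChunks s := by rw [h]; exact List.mem_cons_self
      simpa using hrowlen a this
  have hne : pvChunks s ≠ [] := by rw [hch]; simp
  rw [hhead, pv_zip 17 (pvChunks s) hne hrowlen]
  rw [List.map_reverse, List.map_map]
  apply congrArg List.reverse
  apply List.map_congr_left
  intro j hj
  have hj17 : j < 17 := List.mem_range.mp hj
  have h1802 : (1802 : Nat) = 17 * 106 := by norm_num
  rw [h1802, pv_filt j 106 hj17]
  simp only [Function.comp, hch, List.map_map]
  apply List.map_congr_left
  intro i hi
  have hi' : i < 106 := List.mem_range.mp hi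
  simp only [Function.comp]
  congr 1
  -- s.getD (j + 17*i) ' ' = ((s.drop (17*i)).take 17).getD j ' '  (both are s[17*i + j])
  have hidx : j + 17 * i < 1802 := by omega
  have hd : (s.drop (17 * i)).length = 1802 - 17 * i := by simp [List.length_drop, hlen]
  have ht : ((s.drop (17 * i)).take 17).length = 17 := by
    simp [List.length_take, hd]; omega
  rw [Nat.add_comm j (17 * i),
      List.getD_eq_getElem _ _ (by omega : 17 * i + j < s.length),
      List.getD_eq_getElem _ _ (by omega : j < ((s.drop (17 * i)).take 17).length),
      List.getElem_take, List.getElem_drop]
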